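-- pv_equiv track=rewrite | github.com/scondo-prof/theToolKit | funEndeavors/char_shifter.py | new_char
-- ===== SOURCE A (Python) =====
-- def new_char(input_char_integer: int, shifter: int, shift: bool) -> chr:
--     valid_char_integers = [
--         48,
--         49,
--         50,
--         51,
--         52,
--         53,
--         54,
--         55,
--         56,
--         57,
--         65,
--         66,
--         67,
--         68,
--         69,
--         70,
--         71,
--         72,
--         73,
--         74,
--         75,
--         76,
--         77,
--         78,
--         79,
--         80,
--         81,
--         82,
--         83,
--         84,
--         85,
--         86,
--         87,
--         88,
--         89,
--         90,
--         97,
--         98,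
--         99,
--         100,
--         101,
--         102,
--         103,
--         104,
--         105,
--         106,
--         107,
--         108,
--         109,
--         110,
--         111,
--         112,
--         113,
--         114,
--         115,
--         116,
--         117,
--         118,
--         119,
--         120,
--         121,
--         122,
--     ]
--
--     if input_char_integer in valid_char_integers:
--         index = 0
--         for char_integer in valid_char_integers:
--             if input_char_integer == char_integer:
--                 break
--             index += 1
--
--         if shift:
--             new_char_index = index + shifter
--         else:
--             new_char_index = index - shifter
--         new_char = chr(valid_char_integers[new_char_index % 62])
--
--         return new_char
--     else:
--         return chr(input_char_integer)
-- ===== SOURCE B (Python) =====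
-- def new_char(input_char_integer: int, shifter: int, shift: bool) -> chr:
--     c = input_char_integer
--     if 48 <= c <= 57:
--         index = c - 48
--     elif 65 <= c <= 90:
--         index = c - 65 + 10
--     elif 97 <= c <= 122:
--         index = c - 97 + 36
--     else:
--         return chr(c)
--     new_index = (index + shifter if shift else index - shifter) % 62
--     if new_index < 10:
--         return chr(new_index + 48)
--     elif new_index < 36:
--         return chr(new_index + 55)
--     else:
--         return chr(new_index + 61)
-- ===== Notes on version B (the rewrite author's own statement) =====
-- stated objective: simpler
-- what changed: Replaced the 62-element list literal with membership test and linear index-scan loop by closed-form arithmetic over the three contiguous ASCII ranges (digits, uppercase, lowercase), mapping index and back-mapping the shifted index with constant-time formulas.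
-- outside the precondition, e.g. on new_char(-1, 1, True): A raises ValueError, B raises ValueError
import Mathlib
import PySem

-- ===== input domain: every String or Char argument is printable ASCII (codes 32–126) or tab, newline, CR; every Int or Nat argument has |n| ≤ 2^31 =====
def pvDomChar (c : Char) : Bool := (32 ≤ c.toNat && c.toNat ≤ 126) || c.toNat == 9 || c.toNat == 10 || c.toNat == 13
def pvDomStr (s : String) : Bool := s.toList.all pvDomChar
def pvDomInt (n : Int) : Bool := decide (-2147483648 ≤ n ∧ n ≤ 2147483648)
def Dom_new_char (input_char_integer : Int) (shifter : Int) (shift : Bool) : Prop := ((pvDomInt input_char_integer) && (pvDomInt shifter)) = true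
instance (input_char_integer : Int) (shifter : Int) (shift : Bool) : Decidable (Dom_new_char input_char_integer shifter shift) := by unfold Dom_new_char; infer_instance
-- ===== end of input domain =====

-- B replaces A's 62-element list scan by closed-form arithmetic over the three ASCII ranges (objective: simpler).

-- chr(n) for a valid non-surrogate code point n (exact there; Pre_ restricts to that range)
def pyChr (n : Int) : String := String.mk [Char.ofNat n.toNat]

-- ===== PORT A =====
def pvValidChars : List Int :=
  [48, 49, 50, 51, 52, 53, 54, 55, 56, 57,
   65, 66, 67, 68, 69, 70, 71, 72, 73, 74, 75, 76, 77, 78, 79, 80, 81, 82, 83, 84, 85, 86, 87, 88, 89, 90,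
   97, 98, 99, 100, 101, 102, 103, 104, 105, 106, 107, 108, 109, 110, 111, 112, 113, 114, 115, 116, 117,
   118, 119, 120, 121, 122]

-- the 'for … break' index-counting loop of A
def pvIdxLoop (xs : List Int) (x : Int) (index : Int) : Int :=
  match xs with
  | [] => index
  | v :: rest => if x = v then index else pvIdxLoop rest x (index + 1)

def new_char (input_char_integer : Int) (shifter : Int) (shift : Bool) : String :=
  if pvValidChars.contains input_char_integer then
    let index := pvIdxLoop pvValidChars input_char_integer 0
    let new_char_index := if shift then index + shifter else index - shifter
    pyChr (PySem.List.pyGetD pvValidChars (PySem.Int.mod new_char_index 62) 0)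
  else
    pyChr input_char_integer

-- ===== PORT B =====
-- back-map the (pre-mod) shifted index to its code point, as in Source B's final if/elif/else
def pvBack (i : Int) : String :=
  let m := PySem.Int.mod i 62
  pyChr (if m < 10 then m + 48 else if m < 36 then m + 55 else m + 61)

def new_char_alt (input_char_integer : Int) (shifter : Int) (shift : Bool) : String :=
  let c := input_char_integer
  if 48 ≤ c ∧ c ≤ 57 then
    pvBack (if shift then (c - 48) + shifter else (c - 48) - shifter)
  else if 65 ≤ c ∧ c ≤ 90 then
    pvBack (if shift then (c - 65 + 10) + shifter else (c - 65 + 10) - shifter)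
  else if 97 ≤ c ∧ c ≤ 122 then
    pvBack (if shift then (c - 97 + 36) + shifter else (c - 97 + 36) - shifter)
  else
    pyChr c

-- ===== PRECONDITION & SPEC =====
-- Pre_ excludes inputs on which A's chr(input_char_integer) raises ValueError (codes < 0 or > 0x10FFFF)
-- and the surrogate codes 0xD800–0xDFFF, where A returns a lone-surrogate string that is not a Unicode
-- scalar value and hence not representable as a Lean Char/String; B behaves exactly like A there.
def Pre_new_char (input_char_integer : Int) (shifter : Int) (shift : Bool) : Prop :=
  0 ≤ input_char_integer ∧ input_char_integer ≤ 1114111 ∧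
  ¬ (55296 ≤ input_char_integer ∧ input_char_integer ≤ 57343)
instance (input_char_integer : Int) (shifter : Int) (shift : Bool) : Decidable (Pre_new_char input_char_integer shifter shift) := by unfold Pre_new_char; infer_instance

def pvWitness_new_char : Int × Int × Bool := (97, 5, true)

def Spec_new_char (input_char_integer : Int) (shifter : Int) (shift : Bool) (out : String) : Prop := out = new_char_alt input_char_integer shifter shift
instance (input_char_integer : Int) (shifter : Int) (shift : Bool) (out : String) : Decidable (Spec_new_char input_char_integer shifter shift out) := by unfold Spec_new_char; infer_instance

-- ===== CLAIM (what is proved, stated in full; the proofs are below) =====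
def Claim_equal_new_char : Prop := ∀ (input_char_integer : Int) (shifter : Int) (shift : Bool), Dom_new_char input_char_integer shifter shift → Pre_new_char input_char_integer shifter shift → Spec_new_char input_char_integer shifter shift (new_char input_char_integer shifter shift)

-- ===== LEMMAS AND PROOFS =====

-- table lookup agrees with B's closed-form back-mapping on [0, 62)
theorem pvLookup_eq_back (m : Int) (h0 : 0 ≤ m) (h62 : m < 62) :
    pyChr (PySem.List.pyGetD pvValidChars m 0) =
      pyChr (if m < 10 then m + 48 else if m < 36 then m + 55 else m + 61) := by
  interval_cases m <;> decide

theorem pvA_eq_back (x : Int) :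
    pyChr (PySem.List.pyGetD pvValidChars (PySem.Int.mod x 62) 0) = pvBack x := by
  have h : PySem.Int.mod x 62 = x % 62 := PySem.Int.mod_eq_emod_of_pos (by norm_num)
  unfold pvBack
  exact pvLookup_eq_back _ (by rw [h]; exact Int.emod_nonneg x (by norm_num))
    (by rw [h]; exact Int.emod_lt_of_pos x (by norm_num))

-- A's index-scan loop on the literal table equals the closed-form index, per range
theorem pvIdx_digit (c : Int) (h1 : 48 ≤ c) (h2 : c ≤ 57) :
    pvIdxLoop pvValidChars c 0 = c - 48 := by
  interval_cases c <;> decide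

theorem pvIdx_upper (c : Int) (h1 : 65 ≤ c) (h2 : c ≤ 90) :
    pvIdxLoop pvValidChars c 0 = c - 65 + 10 := by
  interval_cases c <;> decide

theorem pvIdx_lower (c : Int) (h1 : 97 ≤ c) (h2 : c ≤ 122) :
    pvIdxLoop pvValidChars c 0 = c - 97 + 36 := by
  interval_cases c <;> decide

theorem pvContains_iff (c : Int) :
    pvValidChars.contains c = true ↔
      (48 ≤ c ∧ c ≤ 57) ∨ (65 ≤ c ∧ c ≤ 90) ∨ (97 ≤ c ∧ c ≤ 122) := by
  rw [List.contains_iff_mem]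
  simp [pvValidChars]
  omega

-- ===== VERDICT (by name: the statement is the Claim_ definition above) =====
theorem new_char_spec : Claim_equal_new_char := by
  intro c s b _ _
  unfold Spec_new_char
  by_cases hmem : pvValidChars.contains c = true
  · have hc := (pvContains_iff c).mp hmem
    simp only [new_char, new_char_alt, hmem, if_true]
    rcases hc with ⟨h1, h2⟩ | ⟨h1, h2⟩ | ⟨h1, h2⟩
    · rw [pvIdx_digit c h1 h2]
      split_ifs <;> first | exact pvA_eq_back _ | (exfalso; omega)
    · rw [pvIdx_upper c h1 h2]
      split_ifs <;> first | exact pvA_eq_back _ | (exfalso; omega)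
    · rw [pvIdx_lower c h1 h2]
      split_ifs <;> first | exact pvA_eq_back _ | (exfalso; omega)
  · have hc : ¬ ((48 ≤ c ∧ c ≤ 57) ∨ (65 ≤ c ∧ c ≤ 90) ∨ (97 ≤ c ∧ c ≤ 122)) :=
      fun h => hmem ((pvContains_iff c).mpr h)
    simp only [new_char, new_char_alt]
    rw [if_neg hmem]
    split_ifs <;> first | rfl | (exfalso; exact hc (by tauto))
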